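-- pv_equiv track=rewrite | github.com/murkyl/ps_scan | helpers/user_handlers.py | custom_stats_handler
-- ===== SOURCE A (Python) =====
-- CUSTOM_STATS_FIELDS = [
--     "es_queue_time",
--     "es_queue_wait_count",
--     "file_not_found",
--     "get_access_time_time",
--     "get_acl_time",
--     "get_custom_tagging_time",
--     "get_dinode_time",
--     "get_extra_attr_time",
--     "get_user_attr_time",
--     "lstat_required",
--     "lstat_time",
-- ]
--
-- def custom_stats_handler(common_stats, custom_state, custom_threads_state, thread_state):
--     # Access all the individual thread state dictionaries in the custom_threads_state array
--     # These should be initialized in the init_thread routine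
--     # LOG.debug("DEBUG: Custom stats handler called!")
--     # LOG.debug(
--     #    "DEBUG: Common stats: %s"
--     #    % json.dumps(common_stats, indent=2, sort_keys=True, default=lambda o: "<not serializable>")
--     # )
--     # LOG.debug(
--     #   "DEBUG: Custom state: %s"
--     #   % json.dumps(custom_state, indent=2, sort_keys=True, default=lambda o: "<not serializable>")
--     # )
--     # LOG.debug(
--     #   "DEBUG: Custom threads state: %s"
--     #   % json.dumps(custom_threads_state, indent=2, sort_keys=True, default=lambda o: "<not serializable>")
--     # )
--     # LOG.debug(
--     #    "DEBUG: Thread state: %s"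
--     #    % json.dumps(thread_state, indent=2, sort_keys=True, default=lambda o: "<not serializable>")
--     # )
--     custom_stats = custom_state["custom_stats"]
--     for field in CUSTOM_STATS_FIELDS:
--         custom_stats[field] = 0
--     for thread_state in custom_threads_state:
--         thread_stats = thread_state.get("stats", {})
--         for field in CUSTOM_STATS_FIELDS:
--             custom_stats[field] += thread_stats.get(field, 0)
--     return custom_stats
-- ===== SOURCE B (Python) =====
-- CUSTOM_STATS_FIELDS = [
--     "es_queue_time",
--     "es_queue_wait_count",
--     "file_not_found",
--     "get_access_time_time",
--     "get_acl_time",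
--     "get_custom_tagging_time",
--     "get_dinode_time",
--     "get_extra_attr_time",
--     "get_user_attr_time",
--     "lstat_required",
--     "lstat_time",
-- ]
-- _FIELD_SET = frozenset(CUSTOM_STATS_FIELDS)
--
-- def custom_stats_handler(common_stats, custom_state, custom_threads_state, thread_state):
--     # Data-driven: accumulate a totals dict in one pass over the items actually
--     # present in each thread's stats dict (filtered by a frozenset), then write
--     # the totals out per field. No per-field lookups into thread dicts.
--     custom_stats = custom_state["custom_stats"]
--     totals = {}
--     for t in custom_threads_state:
--         for key, value in t.get("stats", {}).items():
--             if key in _FIELD_SET: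
--                 totals[key] = totals.get(key, 0) + value
--     for field in CUSTOM_STATS_FIELDS:
--         custom_stats[field] = totals.get(field, 0)
--     return custom_stats
-- ===== Notes on version B (the rewrite author's own statement) =====
-- stated objective: alternative
-- what changed: Instead of A's zero-then-accumulate nested loops doing a lookup per (thread, field) pair, B makes one pass over the items actually present in each thread's stats dict, filtering keys through a frozenset into a totals dict, and then writes the totals out per field; cost is O(total stats entries + F) rather than O(T*F). Pre_ additionally excludes association-list encodings with duplicate keys inside a thread's stats dict, which encode no Python dict and are never produced by Python inputs, and inputs where custom_state lacks 'custom_stats' (KeyError in both A and B).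
import Mathlib
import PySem

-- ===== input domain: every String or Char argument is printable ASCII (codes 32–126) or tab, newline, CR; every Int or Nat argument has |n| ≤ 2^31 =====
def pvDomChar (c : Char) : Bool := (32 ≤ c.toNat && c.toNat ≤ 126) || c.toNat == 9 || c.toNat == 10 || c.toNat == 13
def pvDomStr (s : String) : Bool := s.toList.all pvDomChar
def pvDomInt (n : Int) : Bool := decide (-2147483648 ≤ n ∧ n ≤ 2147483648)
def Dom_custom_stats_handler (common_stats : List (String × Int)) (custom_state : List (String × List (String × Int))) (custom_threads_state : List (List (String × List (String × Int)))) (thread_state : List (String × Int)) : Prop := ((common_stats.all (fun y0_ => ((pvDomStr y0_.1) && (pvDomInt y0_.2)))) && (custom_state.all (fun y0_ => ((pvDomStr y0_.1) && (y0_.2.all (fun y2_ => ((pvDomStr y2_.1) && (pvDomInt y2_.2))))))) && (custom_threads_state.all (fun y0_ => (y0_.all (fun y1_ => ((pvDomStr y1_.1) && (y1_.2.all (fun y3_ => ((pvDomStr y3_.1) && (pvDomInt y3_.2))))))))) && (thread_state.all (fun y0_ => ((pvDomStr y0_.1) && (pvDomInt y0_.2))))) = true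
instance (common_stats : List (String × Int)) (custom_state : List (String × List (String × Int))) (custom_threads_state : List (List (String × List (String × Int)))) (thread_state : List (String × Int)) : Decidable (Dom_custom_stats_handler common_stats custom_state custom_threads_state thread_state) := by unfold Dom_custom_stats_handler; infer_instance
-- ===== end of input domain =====

-- B replaces A's zero-then-accumulate nested loops (a lookup per thread×field pair) by one
-- pass over the items actually present in each thread's stats dict, filtered through a
-- frozenset into a totals dict, then one write-out loop per field. Equivalence is about
-- the RETURN value; both Pythons mutate the same custom_state["custom_stats"] dict in place
-- and leave it in the same final state.

def CUSTOM_STATS_FIELDS : List String :=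
  ["es_queue_time", "es_queue_wait_count", "file_not_found", "get_access_time_time",
   "get_acl_time", "get_custom_tagging_time", "get_dinode_time", "get_extra_attr_time",
   "get_user_attr_time", "lstat_required", "lstat_time"]

-- ===== PORT A =====
def custom_stats_handler (common_stats : List (String × Int)) (custom_state : List (String × List (String × Int))) (custom_threads_state : List (List (String × List (String × Int)))) (thread_state : List (String × Int)) : List (String × Int) :=
  match (PySem.Dict.mk custom_state).get? "custom_stats" with
  | none => []   -- KeyError in Python; excluded by Pre_custom_stats_handler
  | some cs0 =>
    -- for field in CUSTOM_STATS_FIELDS: custom_stats[field] = 0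
    let d1 := CUSTOM_STATS_FIELDS.foldl (fun d f => d.insert f 0) (PySem.Dict.mk cs0)
    -- for thread_state in custom_threads_state: … += thread_stats.get(field, 0)
    let d2 := custom_threads_state.foldl (fun d t =>
      let thread_stats := PySem.Dict.mk ((PySem.Dict.mk t).getD "stats" [])
      CUSTOM_STATS_FIELDS.foldl (fun d f => d.insert f (d.getD f 0 + thread_stats.getD f 0)) d) d1
    d2.items

-- ===== PORT B =====
-- helper: the totals dict B accumulates over the items of each thread's stats dict
def pvTotals (custom_threads_state : List (List (String × List (String × Int)))) : PySem.Dict String Int :=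
  custom_threads_state.foldl (fun tot t =>
    ((PySem.Dict.mk ((PySem.Dict.mk t).getD "stats" [])).items).foldl
      (fun tot kv => if CUSTOM_STATS_FIELDS.contains kv.1 then tot.insert kv.1 (tot.getD kv.1 0 + kv.2) else tot)
      tot) (PySem.Dict.empty)

def custom_stats_handler_alt (common_stats : List (String × Int)) (custom_state : List (String × List (String × Int))) (custom_threads_state : List (List (String × List (String × Int)))) (thread_state : List (String × Int)) : List (String × Int) :=
  match (PySem.Dict.mk custom_state).get? "custom_stats" with
  | none => []   -- KeyError in Python; excluded by Pre_custom_stats_handler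
  | some cs0 =>
    -- totals[key] = totals.get(key, 0) + value, over the items of each stats dict, key in _FIELD_SET
    let totals := pvTotals custom_threads_state
    -- for field in CUSTOM_STATS_FIELDS: custom_stats[field] = totals.get(field, 0)
    (CUSTOM_STATS_FIELDS.foldl (fun d f => d.insert f (totals.getD f 0)) (PySem.Dict.mk cs0)).items

-- ===== PRECONDITION & SPEC =====
-- Pre_ excludes (a) inputs where custom_state has no "custom_stats" key — both A and B raise
-- KeyError there — and (b) association-list encodings carrying duplicate keys inside a thread's
-- stats dict: those encode no Python dict (Python dict keys are unique), so no Python input is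
-- excluded by (b).
def Pre_custom_stats_handler (common_stats : List (String × Int)) (custom_state : List (String × List (String × Int))) (custom_threads_state : List (List (String × List (String × Int)))) (thread_state : List (String × Int)) : Prop :=
  (PySem.Dict.mk custom_state).contains "custom_stats" = true ∧
  ∀ t ∈ custom_threads_state, (((PySem.Dict.mk t).getD "stats" []).map Prod.fst).Nodup
instance (common_stats : List (String × Int)) (custom_state : List (String × List (String × Int))) (custom_threads_state : List (List (String × List (String × Int)))) (thread_state : List (String × Int)) : Decidable (Pre_custom_stats_handler common_stats custom_state custom_threads_state thread_state) := by unfold Pre_custom_stats_handler; infer_instance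

def pvWitness_custom_stats_handler : (List (String × Int)) × (List (String × List (String × Int))) × (List (List (String × List (String × Int)))) × (List (String × Int)) :=
  ([], [("custom_stats", [("x", 5)])], [[("stats", [("lstat_time", 2)])]], [])

def Spec_custom_stats_handler (common_stats : List (String × Int)) (custom_state : List (String × List (String × Int))) (custom_threads_state : List (List (String × List (String × Int)))) (thread_state : List (String × Int)) (out : List (String × Int)) : Prop := out = custom_stats_handler_alt common_stats custom_state custom_threads_state thread_state
instance (common_stats : List (String × Int)) (custom_state : List (String × List (String × Int))) (custom_threads_state : List (List (String × List (String × Int)))) (thread_state : List (String × Int)) (out : List (String × Int)) : Decidable (Spec_custom_stats_handler common_stats custom_state custom_threads_state thread_state out) := by unfold Spec_custom_stats_handler; infer_instance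

-- ===== CLAIM (what is proved, stated in full; the proofs are below) =====
def Claim_equal_custom_stats_handler : Prop := ∀ (common_stats : List (String × Int)) (custom_state : List (String × List (String × Int))) (custom_threads_state : List (List (String × List (String × Int)))) (thread_state : List (String × Int)), Dom_custom_stats_handler common_stats custom_state custom_threads_state thread_state → Pre_custom_stats_handler common_stats custom_state custom_threads_state thread_state → Spec_custom_stats_handler common_stats custom_state custom_threads_state thread_state (custom_stats_handler common_stats custom_state custom_threads_state thread_state)

-- ===== LEMMAS AND PROOFS =====

-- ---- A-side normal form: thread-major accumulation = one pure insert per field ----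

-- lookup is unchanged by an insert-loop that never touches the key
theorem getD_foldl_insert_not_mem (fs : List String) (v : String → Int)
    (d : PySem.Dict String Int) (f : String) (h : f ∉ fs) :
    (fs.foldl (fun d g => d.insert g (v g)) d).getD f 0 = d.getD f 0 := by
  induction fs generalizing d with
  | nil => rfl
  | cons g gs ih =>
    simp only [List.mem_cons, not_or] at h
    simp only [List.foldl_cons, ih _ h.2, PySem.Dict.getD_insert_of_ne _ _ _ h.1]

-- after inserting v g for each g in a nodup list, looking up a member f gives v f
theorem getD_foldl_insert_mem (fs : List String) (v : String → Int)
    (d : PySem.Dict String Int) (f : String) (hf : f ∈ fs) (hnd : fs.Nodup) :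
    (fs.foldl (fun d g => d.insert g (v g)) d).getD f 0 = v f := by
  induction fs generalizing d with
  | nil => cases hf
  | cons g gs ih =>
    rcases List.mem_cons.mp hf with rfl | hf'
    · simp only [List.foldl_cons,
        getD_foldl_insert_not_mem gs v _ f (List.nodup_cons.mp hnd).1,
        PySem.Dict.getD_insert_self]
    · simpa only [List.foldl_cons] using ih _ hf' (List.nodup_cons.mp hnd).2

-- two inserts at distinct keys commute (items level) when the second key is already present
theorem insert_comm_of_contains (d : PySem.Dict String Int) (g f : String) (x y : Int)
    (hg : d.contains g = true) (hne : f ≠ g) :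
    (d.insert f y).insert g x = (d.insert g x).insert f y := by
  have hfg : (f == g) = false := by simp [hne]
  have hgf : (g == f) = false := by simp [Ne.symm hne]
  apply PySem.Dict.ext
  by_cases hf : d.contains f = true
  · rw [PySem.Dict.items_insert_of_contains _ _ (by rw [PySem.Dict.contains_insert, hgf, hg]; rfl),
        PySem.Dict.items_insert_of_contains _ _ hf,
        PySem.Dict.items_insert_of_contains _ _ (by rw [PySem.Dict.contains_insert, hfg, hf]; rfl),
        PySem.Dict.items_insert_of_contains _ _ hg]
    simp only [List.map_map]
    refine List.map_congr_left (fun p _ => ?_)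
    simp only [Function.comp]
    by_cases h1 : p.1 = f
    · simp [h1, hfg]
    · by_cases h2 : p.1 = g <;> simp [h1, h2, hgf]
  · have hf' : d.contains f = false := by revert hf; cases d.contains f <;> simp
    rw [PySem.Dict.items_insert_of_contains _ _ (by rw [PySem.Dict.contains_insert, hgf, hg]; rfl),
        PySem.Dict.items_insert_of_not_contains _ _ hf',
        PySem.Dict.items_insert_of_not_contains _ _ (by rw [PySem.Dict.contains_insert, hfg, hf']; rfl),
        PySem.Dict.items_insert_of_contains _ _ hg]
    rw [List.map_append]
    simp only [List.map_cons, List.map_nil, hfg, Bool.false_eq_true, if_false]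

-- an insert at a key the loop never touches (and the dict already has) moves through the loop
theorem foldl_insert_comm (fs : List String) (v : String → Int)
    (d : PySem.Dict String Int) (g : String) (x : Int)
    (hg : d.contains g = true) (hne : g ∉ fs) :
    (fs.foldl (fun d f => d.insert f (v f)) d).insert g x
      = fs.foldl (fun d f => d.insert f (v f)) (d.insert g x) := by
  induction fs generalizing d with
  | nil => rfl
  | cons f fs ih =>
    simp only [List.mem_cons, not_or] at hne
    have hg' : (d.insert f (v f)).contains g = true := by
      rw [PySem.Dict.contains_insert, hg]; simp
    simp only [List.foldl_cons, ih _ hg' hne.2,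
      insert_comm_of_contains d g f x (v f) hg (fun e => hne.1 e.symm)]

-- a second insert-loop over the same nodup keys absorbs the first
theorem foldl_insert_absorb (fs : List String) (hnd : fs.Nodup) (u v : String → Int)
    (d : PySem.Dict String Int) :
    fs.foldl (fun d f => d.insert f (u f)) (fs.foldl (fun d f => d.insert f (v f)) d)
      = fs.foldl (fun d f => d.insert f (u f)) d := by
  induction fs generalizing d with
  | nil => rfl
  | cons g gs ih =>
    have hnd' := List.nodup_cons.mp hnd
    simp only [List.foldl_cons]
    rw [foldl_insert_comm gs v (d.insert g (v g)) g (u g)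
          (PySem.Dict.contains_insert_self _ _ _) hnd'.1,
        PySem.Dict.insert_insert_self, ih hnd'.2]

-- the read-modify-write loop equals a pure insert loop when the starting values are known
theorem inner_loop_eq (fs : List String) (hnd : fs.Nodup) (v w : String → Int)
    (d : PySem.Dict String Int) (h : ∀ f ∈ fs, d.getD f 0 = v f) :
    fs.foldl (fun d f => d.insert f (d.getD f 0 + w f)) d
      = fs.foldl (fun d f => d.insert f (v f + w f)) d := by
  induction fs generalizing d with
  | nil => rfl
  | cons g gs ih =>
    have hnd' := List.nodup_cons.mp hnd
    simp only [List.foldl_cons, h g List.mem_cons_self]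
    refine ih hnd'.2 _ (fun f hf => ?_)
    have hne : f ≠ g := fun e => hnd'.1 (e ▸ hf)
    rw [PySem.Dict.getD_insert_of_ne _ _ _ hne]
    exact h f (List.mem_cons_of_mem _ hf)

-- thread-major accumulation over a pure insert base is the field-major sum
theorem acc_eq {T : Type} (fs : List String) (hnd : fs.Nodup) (w : T → String → Int)
    (ts : List T) (v : String → Int) (d : PySem.Dict String Int) :
    ts.foldl (fun d t => fs.foldl (fun d f => d.insert f (d.getD f 0 + w t f)) d)
        (fs.foldl (fun d f => d.insert f (v f)) d)
      = fs.foldl (fun d f => d.insert f (ts.foldl (fun a t => a + w t f) (v f))) d := by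
  induction ts generalizing v with
  | nil => rfl
  | cons t ts ih =>
    simp only [List.foldl_cons]
    rw [inner_loop_eq fs hnd v (w t) _ (fun f hf => getD_foldl_insert_mem fs v d f hf hnd),
        foldl_insert_absorb fs hnd _ v d]
    exact ih (fun f => v f + w t f)

theorem fields_nodup : CUSTOM_STATS_FIELDS.Nodup := by decide

-- ---- B-side: characterising the totals dict built item-wise ----

-- unfolding a literal dict lookup one pair at a time
theorem mk_getD_cons (kv : String × Int) (rest : List (String × Int)) (f : String) :
    (PySem.Dict.mk (kv :: rest)).getD f 0
      = if kv.1 == f then kv.2 else (PySem.Dict.mk rest).getD f 0 := by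
  rw [PySem.Dict.getD_eq_get?_getD, PySem.Dict.get?_mk_cons]
  split
  · rfl
  · rw [PySem.Dict.getD_eq_get?_getD]

-- B's item loop leaves a key it never meets unchanged
theorem getD_itemsfold_not_mem (l : List (String × Int)) (tot : PySem.Dict String Int)
    (f : String) (h : f ∉ l.map Prod.fst) :
    (l.foldl (fun tot kv => if CUSTOM_STATS_FIELDS.contains kv.1 then tot.insert kv.1 (tot.getD kv.1 0 + kv.2) else tot) tot).getD f 0
      = tot.getD f 0 := by
  induction l generalizing tot with
  | nil => rfl
  | cons kv rest ih =>
    simp only [List.map_cons, List.mem_cons, not_or] at h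
    simp only [List.foldl_cons]
    rw [ih _ h.2]
    split
    · exact PySem.Dict.getD_insert_of_ne _ _ _ h.1
    · rfl

-- B's item loop over a nodup-keyed stats list adds exactly that dict's value at each field
theorem getD_itemsfold (l : List (String × Int)) (hnd : (l.map Prod.fst).Nodup)
    (tot : PySem.Dict String Int) (f : String) (hf : CUSTOM_STATS_FIELDS.contains f = true) :
    (l.foldl (fun tot kv => if CUSTOM_STATS_FIELDS.contains kv.1 then tot.insert kv.1 (tot.getD kv.1 0 + kv.2) else tot) tot).getD f 0
      = tot.getD f 0 + (PySem.Dict.mk l).getD f 0 := by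
  induction l generalizing tot with
  | nil =>
    show tot.getD f 0 = tot.getD f 0 + (PySem.Dict.empty).getD f 0
    rw [PySem.Dict.getD_empty]; ring
  | cons kv rest ih =>
    rw [List.map_cons] at hnd
    have hnd' := List.nodup_cons.mp hnd
    simp only [List.foldl_cons]
    rw [mk_getD_cons]
    by_cases hk : kv.1 = f
    · subst hk
      rw [getD_itemsfold_not_mem rest _ kv.1 hnd'.1, hf, beq_self_eq_true]
      simp [PySem.Dict.getD_insert_self]
    · rw [beq_eq_false_iff_ne.mpr hk, ih hnd'.2]
      simp only [Bool.false_eq_true, if_false]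
      split
      · rw [PySem.Dict.getD_insert_of_ne _ _ _ (fun e => hk e.symm)]
      · rfl

-- folding B's item loop over all threads accumulates, per field, each thread's stats value
theorem totals_getD (ts : List (List (String × List (String × Int))))
    (hnd : ∀ t ∈ ts, (((PySem.Dict.mk t).getD "stats" []).map Prod.fst).Nodup)
    (f : String) (hf : CUSTOM_STATS_FIELDS.contains f = true)
    (tot : PySem.Dict String Int) :
    (ts.foldl (fun tot t =>
        ((PySem.Dict.mk ((PySem.Dict.mk t).getD "stats" [])).items).foldl
          (fun tot kv => if CUSTOM_STATS_FIELDS.contains kv.1 then tot.insert kv.1 (tot.getD kv.1 0 + kv.2) else tot)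
          tot) tot).getD f 0
      = ts.foldl (fun a t => a + (PySem.Dict.mk ((PySem.Dict.mk t).getD "stats" [])).getD f 0) (tot.getD f 0) := by
  induction ts generalizing tot with
  | nil => rfl
  | cons t ts ih =>
    simp only [List.foldl_cons]
    rw [ih (fun t ht => hnd t (List.mem_cons_of_mem _ ht)),
        getD_itemsfold _ (hnd t List.mem_cons_self) tot f hf]

-- inserting pointwise-equal values over the same key list gives the same dict
theorem foldl_insert_congr (fs : List String) (u v : String → Int)
    (d : PySem.Dict String Int) (h : ∀ f ∈ fs, u f = v f) :
    fs.foldl (fun d f => d.insert f (u f)) d = fs.foldl (fun d f => d.insert f (v f)) d := by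
  induction fs generalizing d with
  | nil => rfl
  | cons g gs ih =>
    simp only [List.foldl_cons, h g List.mem_cons_self]
    exact ih _ (fun f hf => h f (List.mem_cons_of_mem _ hf))

-- ===== VERDICT (by name: the statement is the Claim_ definition above) =====
theorem custom_stats_handler_spec : Claim_equal_custom_stats_handler := by
  intro common_stats custom_state custom_threads_state thread_state _ hpre
  obtain ⟨hcontains, hnd⟩ := hpre
  unfold Spec_custom_stats_handler custom_stats_handler custom_stats_handler_alt
  cases hcs : (PySem.Dict.mk custom_state).get? "custom_stats" with
  | none =>
    simp [PySem.Dict.contains_eq_isSome_get?, hcs] at hcontains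
  | some cs0 =>
    simp only []
    rw [acc_eq CUSTOM_STATS_FIELDS fields_nodup
      (fun t f => (PySem.Dict.mk ((PySem.Dict.mk t).getD "stats" [])).getD f 0)
      custom_threads_state (fun _ => 0) (PySem.Dict.mk cs0)]
    refine congrArg PySem.Dict.items (foldl_insert_congr _ _ _ _ (fun f hf => ?_))
    have hf' : CUSTOM_STATS_FIELDS.contains f = true := List.contains_iff_mem.mpr hf
    show List.foldl _ 0 _ = (pvTotals custom_threads_state).getD f 0
    rw [pvTotals, totals_getD custom_threads_state hnd f hf' PySem.Dict.empty,
        PySem.Dict.getD_empty]
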